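-- pv_equiv track=rewrite | github.com/HNXJ/Jnwb | repos/jnwb/jnwb/lfp.py | map_channels_to_areas
-- ===== SOURCE A (Python) =====
-- def map_channels_to_areas(probe_mapping):
--     """
--     Creates a direct channel-to-area lookup map.
--     Assumes 128 channels per probe (A: 0-127, B: 128-255, C: 256-383).
--     """
--     channel_map = {}
--
--     # Standard probe offsets
--     offsets = {'probeA': 0, 'probeB': 128, 'probeC': 256}
--
--     for probe, areas in probe_mapping.items():
--         if probe not in offsets: continue
--         offset = offsets[probe]
--         n_areas = len(areas)
--
--         if n_areas == 1:
--             for c in range(128):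
--                 channel_map[offset + c] = areas[0]
--         elif n_areas >= 2:
--             # Divide probe equally
--             chunk = 128 // n_areas
--             for i, area in enumerate(areas):
--                 start = i * chunk
--                 end = (i + 1) * chunk if i < n_areas - 1 else 128
--                 for c in range(start, end):
--                     channel_map[offset + c] = area
--
--     return channel_map
-- ===== SOURCE B (Python) =====
-- _OFFSETS = {'probeA': 0, 'probeB': 128, 'probeC': 256}
--
--
-- def map_channels_to_areas(probe_mapping):
--     """Single pass over the 128 channels of each probe: each channel looks up
--     the area that owns it (idx = min(c // chunk, n - 1), last area when chunk == 0)."""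
--     channel_map = {}
--     for probe, areas in probe_mapping.items():
--         offset = _OFFSETS.get(probe)
--         if offset is None or not areas:
--             continue
--         n = len(areas)
--         chunk = 128 // n
--         for c in range(128):
--             idx = min(c // chunk, n - 1) if chunk else n - 1
--             channel_map[offset + c] = areas[idx]
--     return channel_map
-- ===== Notes on version B (the rewrite author's own statement) =====
-- stated objective: simpler
-- what changed: A's outer loop over areas with nested per-segment channel loops (plus a special branch for a single area) is replaced by one flat pass over the 128 channels of each probe, each channel computing the index of the area that owns it as min(c // chunk, n-1) (last area when chunk == 0).
import Mathlib
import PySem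

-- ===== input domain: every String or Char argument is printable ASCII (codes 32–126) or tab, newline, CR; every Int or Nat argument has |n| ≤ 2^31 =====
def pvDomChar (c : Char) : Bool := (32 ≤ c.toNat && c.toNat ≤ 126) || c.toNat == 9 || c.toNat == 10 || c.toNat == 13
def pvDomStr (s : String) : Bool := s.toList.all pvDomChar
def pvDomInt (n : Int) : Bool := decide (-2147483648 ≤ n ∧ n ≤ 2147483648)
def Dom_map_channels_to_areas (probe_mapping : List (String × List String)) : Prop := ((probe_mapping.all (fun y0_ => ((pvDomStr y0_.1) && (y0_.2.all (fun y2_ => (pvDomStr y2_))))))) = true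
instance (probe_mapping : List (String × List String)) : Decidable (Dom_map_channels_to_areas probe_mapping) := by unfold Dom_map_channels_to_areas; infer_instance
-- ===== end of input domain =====

-- B replaces A's per-area nested loops by a single pass over the 128 channels of each
-- probe, each channel computing the index of the area that owns it (objective: simpler).

-- ===== PORT A =====
def pvOffsetsA : PySem.Dict String Int :=
  PySem.Dict.ofList [("probeA", 0), ("probeB", 128), ("probeC", 256)]

def map_channels_to_areas (probe_mapping : List (String × List String)) : List (Int × String) :=
  (probe_mapping.foldl
    (fun channel_map pa =>
      match PySem.Dict.get? pvOffsetsA pa.1 with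
      | none => channel_map               -- 'if probe not in offsets: continue'
      | some offset =>
        let n_areas : Int := pa.2.length
        if n_areas = 1 then
          (PySem.List.pyRange 0 128 1).foldl
            (fun cm c => cm.insert (offset + c) (PySem.List.pyGetD pa.2 0 "")) channel_map
        else if 2 ≤ n_areas then
          let chunk := PySem.Int.floordiv 128 n_areas
          (PySem.List.enumerate pa.2 0).foldl
            (fun cm ia =>
              let start := ia.1 * chunk
              let stop := if ia.1 < n_areas - 1 then (ia.1 + 1) * chunk else 128
              (PySem.List.pyRange start stop 1).foldl
                (fun cm2 c => cm2.insert (offset + c) ia.2) cm)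
            channel_map
        else channel_map)
    PySem.Dict.empty).items

-- ===== PORT B =====
def pvOffsetsB : PySem.Dict String Int :=
  PySem.Dict.ofList [("probeA", 0), ("probeB", 128), ("probeC", 256)]

def map_channels_to_areas_alt (probe_mapping : List (String × List String)) : List (Int × String) :=
  (probe_mapping.foldl
    (fun channel_map pa =>
      match PySem.Dict.get? pvOffsetsB pa.1 with
      | none => channel_map               -- offset is None
      | some offset =>
        if pa.2.isEmpty then channel_map  -- 'or not areas'
        else
          let n : Int := pa.2.length
          let chunk := PySem.Int.floordiv 128 n
          (PySem.List.pyRange 0 128 1).foldl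
            (fun cm c =>
              let idx := if chunk ≠ 0 then min (PySem.Int.floordiv c chunk) (n - 1) else n - 1
              cm.insert (offset + c) (PySem.List.pyGetD pa.2 idx "")) channel_map)
    PySem.Dict.empty).items

-- ===== PRECONDITION & SPEC =====
def Spec_map_channels_to_areas (probe_mapping : List (String × List String)) (out : List (Int × String)) : Prop := out = map_channels_to_areas_alt probe_mapping
instance (probe_mapping : List (String × List String)) (out : List (Int × String)) : Decidable (Spec_map_channels_to_areas probe_mapping out) := by unfold Spec_map_channels_to_areas; infer_instance

-- ===== CLAIM (what is proved, stated in full; the proofs are below) =====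
def Claim_equal_map_channels_to_areas : Prop := ∀ (probe_mapping : List (String × List String)), Dom_map_channels_to_areas probe_mapping → Spec_map_channels_to_areas probe_mapping (map_channels_to_areas probe_mapping)

-- ===== LEMMAS AND PROOFS =====

-- insert a whole list of (key, value) pairs, left to right
def pvIns (cm : PySem.Dict Int String) (ps : List (Int × String)) : PySem.Dict Int String :=
  ps.foldl (fun d p => d.insert p.1 p.2) cm

lemma pvIns_append (cm : PySem.Dict Int String) (xs ys : List (Int × String)) :
    pvIns cm (xs ++ ys) = pvIns (pvIns cm xs) ys := by
  simp [pvIns, List.foldl_append]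

-- an insertion loop over channels IS pvIns of the mapped pair list
lemma pvIns_loop (cm : PySem.Dict Int String) (cs : List Int) (f : Int → String) (offset : Int) :
    cs.foldl (fun d c => d.insert (offset + c) (f c)) cm
      = pvIns cm (cs.map (fun c => (offset + c, f c))) := by
  simp [pvIns, List.foldl_map]

lemma pvIns_flatMap {α : Type} (l : List α) (f : α → List (Int × String))
    (cm : PySem.Dict Int String) :
    l.foldl (fun d x => pvIns d (f x)) cm = pvIns cm (l.flatMap f) := by
  induction l generalizing cm with
  | nil => simp [pvIns]
  | cons x xs ih => simp [List.flatMap_cons, pvIns_append, ih]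

-- the covering lemma: A's enumerate-of-segments pair list from area index m on
-- equals B's single channel pass over [m*chunk, 128)
lemma pvCover (offset : Int) (areas : List String) (chunk : Int)
    (hchunk : chunk = PySem.Int.floordiv 128 (areas.length : Int)) :
    ∀ (l : List String) (m : Nat), areas.drop m = l → m < areas.length →
    (PySem.List.enumerate l (m : Int)).flatMap
        (fun ia => (PySem.List.pyRange (ia.1 * chunk)
            (if ia.1 < (areas.length : Int) - 1 then (ia.1 + 1) * chunk else 128) 1).map
          (fun c => (offset + c, ia.2)))
      = (PySem.List.pyRange ((m : Int) * chunk) 128 1).map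
          (fun c => (offset + c, PySem.List.pyGetD areas
            (if chunk ≠ 0 then min (PySem.Int.floordiv c chunk) ((areas.length : Int) - 1)
             else (areas.length : Int) - 1) "")) := by
  intro l
  induction l with
  | nil =>
    intro m hdrop hm
    have : areas.length ≤ m := List.drop_eq_nil_iff.mp hdrop
    omega
  | cons a l' ih =>
    intro m hdrop hm
    have h2 := List.drop_eq_getElem_cons (l := areas) hm
    rw [hdrop] at h2
    obtain ⟨ha, hdrop'⟩ : a = areas[m] ∧ l' = areas.drop (m + 1) := by
      exact ⟨(List.cons.injEq _ _ _ _ ▸ h2).1, (List.cons.injEq _ _ _ _ ▸ h2).2⟩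
    have hchunkN : chunk = ((128 / areas.length : Nat) : Int) := by
      rw [hchunk]; exact_mod_cast PySem.Int.floordiv_natCast 128 areas.length
    have hchunk0 : 0 ≤ chunk := by rw [hchunkN]; positivity
    have hmulN : areas.length * (128 / areas.length) ≤ 128 := by
      calc areas.length * (128 / areas.length) = 128 / areas.length * areas.length := Nat.mul_comm _ _
        _ ≤ 128 := Nat.div_mul_le_self 128 areas.length
    rw [PySem.List.enumerate_cons, List.flatMap_cons]
    by_cases hlast : m + 1 = areas.length
    · have hl' : l' = [] := by
        rw [hdrop']; exact List.drop_eq_nil_iff.mpr (by omega)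
      subst hl'
      have hcond : ¬ ((m : Int) < (areas.length : Int) - 1) := by omega
      simp only [PySem.List.enumerate_nil, List.flatMap_nil, List.append_nil, if_neg hcond]
      apply List.map_congr_left
      intro c hc
      obtain ⟨hc1, hc2⟩ := PySem.List.mem_pyRange_one.mp hc
      have hidx : (if chunk ≠ 0 then min (PySem.Int.floordiv c chunk) ((areas.length : Int) - 1)
          else (areas.length : Int) - 1) = (m : Int) := by
        have hm1 : (areas.length : Int) - 1 = (m : Int) := by omega
        by_cases hch : chunk = 0
        · simp [hch, hm1]
        · have hpos : 0 < chunk := lt_of_le_of_ne hchunk0 (Ne.symm hch)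
          have hle : (m : Int) ≤ PySem.Int.floordiv c chunk :=
            (PySem.Int.le_floordiv_iff_mul_le hpos).mpr hc1
          rw [if_pos hch, hm1, min_eq_right hle]
      rw [hidx, PySem.List.pyGetD_natCast]
      simp [List.getD_eq_getElem?_getD, List.getElem?_eq_getElem hm, ha]
    · have hm1 : m + 1 < areas.length := by omega
      have hcond : (m : Int) < (areas.length : Int) - 1 := by omega
      have hih := ih (m + 1) hdrop'.symm hm1
      push_cast at hih
      simp only [if_pos hcond]
      rw [hih]
      have hsp1 : (m : Int) * chunk ≤ ((m : Int) + 1) * chunk :=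
        mul_le_mul_of_nonneg_right (by omega) hchunk0
      have hsp2 : ((m : Int) + 1) * chunk ≤ 128 := by
        have h1 : (m + 1) * (128 / areas.length) ≤ areas.length * (128 / areas.length) :=
          Nat.mul_le_mul_right _ (by omega)
        have h2 : (m + 1) * (128 / areas.length) ≤ 128 := le_trans h1 hmulN
        rw [hchunkN]; push_cast; exact_mod_cast h2
      rw [PySem.List.pyRange_one_append ((m : Int) * chunk) (((m : Int) + 1) * chunk) 128 hsp1 hsp2,
        List.map_append]
      congr 1
      apply List.map_congr_left
      intro c hc
      obtain ⟨hc1, hc2⟩ := PySem.List.mem_pyRange_one.mp hc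
      have hch : chunk ≠ 0 := by
        intro h; rw [h] at hc1 hc2; omega
      have hpos : 0 < chunk := lt_of_le_of_ne hchunk0 (Ne.symm hch)
      have hfd : PySem.Int.floordiv c chunk = (m : Int) :=
        (PySem.Int.floordiv_eq_iff_of_pos hpos).mpr ⟨hc1, hc2⟩
      have hmin : min (m : Int) ((areas.length : Int) - 1) = (m : Int) :=
        min_eq_left (by omega)
      rw [if_pos hch, hfd, hmin, PySem.List.pyGetD_natCast]
      simp [List.getD_eq_getElem?_getD, List.getElem?_eq_getElem hm, ha]


-- one probe entry: A's branch-by-branch body equals B's single channel pass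
lemma pvEntry (offset : Int) (areas : List String) (cm : PySem.Dict Int String) :
    (if (areas.length : Int) = 1 then
        (PySem.List.pyRange 0 128 1).foldl
          (fun d c => d.insert (offset + c) (PySem.List.pyGetD areas 0 "")) cm
      else if 2 ≤ (areas.length : Int) then
        (PySem.List.enumerate areas 0).foldl
          (fun d ia =>
            let start := ia.1 * PySem.Int.floordiv 128 (areas.length : Int)
            let stop := if ia.1 < (areas.length : Int) - 1
              then (ia.1 + 1) * PySem.Int.floordiv 128 (areas.length : Int) else 128
            (PySem.List.pyRange start stop 1).foldl
              (fun d2 c => d2.insert (offset + c) ia.2) d)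
          cm
      else cm)
    = (if areas.isEmpty then cm
       else
        (PySem.List.pyRange 0 128 1).foldl
          (fun d c =>
            d.insert (offset + c)
              (PySem.List.pyGetD areas
                (if PySem.Int.floordiv 128 (areas.length : Int) ≠ 0
                 then min (PySem.Int.floordiv c (PySem.Int.floordiv 128 (areas.length : Int)))
                      ((areas.length : Int) - 1)
                 else (areas.length : Int) - 1) "")) cm) := by
  by_cases h0 : areas = []
  · subst h0; norm_num
  · have hN : 0 < areas.length := List.length_pos_iff.mpr h0
    have hni : ¬(areas.isEmpty = true) := by simpa [List.isEmpty_iff] using h0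
    by_cases h1 : areas.length = 1
    · have h1' : (areas.length : Int) = 1 := by exact_mod_cast h1
      rw [if_pos h1', if_neg hni]
      rw [pvIns_loop cm (PySem.List.pyRange 0 128 1) (fun _ => PySem.List.pyGetD areas 0 "") offset]
      rw [pvIns_loop cm (PySem.List.pyRange 0 128 1)
        (fun c => PySem.List.pyGetD areas
          (if PySem.Int.floordiv 128 (areas.length : Int) ≠ 0
           then min (PySem.Int.floordiv c (PySem.Int.floordiv 128 (areas.length : Int)))
                ((areas.length : Int) - 1)
           else (areas.length : Int) - 1) "") offset]
      congr 1
      apply List.map_congr_left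
      intro c hc
      obtain ⟨hc1, hc2⟩ := PySem.List.mem_pyRange_one.mp hc
      have hch : PySem.Int.floordiv 128 (areas.length : Int) = 128 := by
        rw [h1']; decide
      have hfd : PySem.Int.floordiv c 128 = 0 :=
        (PySem.Int.floordiv_eq_iff_of_pos (by omega)).mpr (by omega)
      rw [hch, h1']
      simp only [hfd]
      norm_num
    · have h2 : 2 ≤ areas.length := by omega
      have h2' : (2 : Int) ≤ (areas.length : Int) := by exact_mod_cast h2
      have h1' : ¬((areas.length : Int) = 1) := by exact_mod_cast h1
      rw [if_neg h1', if_pos h2', if_neg hni]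
      simp only [pvIns_loop, pvIns_flatMap]
      congr 1
      have := pvCover offset areas (PySem.Int.floordiv 128 (areas.length : Int)) rfl
        areas 0 List.drop_zero hN
      simpa using this


lemma pvFoldlCongr {α β : Type} (f g : β → α → β) (h : ∀ b a, f b a = g b a)
    (init : β) (l : List α) : l.foldl f init = l.foldl g init := by
  rw [show f = g from funext fun b => funext fun a => h b a]

-- ===== VERDICT (by name: the statement is the Claim_ definition above) =====
theorem map_channels_to_areas_spec : Claim_equal_map_channels_to_areas := by
  intro pm _
  show map_channels_to_areas pm = map_channels_to_areas_alt pm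
  unfold map_channels_to_areas map_channels_to_areas_alt
  congr 1
  apply pvFoldlCongr
  intro cm pa
  rw [show pvOffsetsB = pvOffsetsA from rfl]
  cases h : PySem.Dict.get? pvOffsetsA pa.1 with
  | none => rfl
  | some offset => simpa using pvEntry offset pa.2 cm
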